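-- pv_equiv track=rewrite | github.com/ethannn1/projet_laby | creation_laby_final.py | trouve_liaisons
-- ===== SOURCE A (Python) =====
-- def trouve_voisin(node:int, nb_lignes:int, nb_colonnes:int) -> list:
--     """Renvoie la liste de tout les voisins du noeud mis en paramètre"""
--     voisins = []
--     if node%nb_colonnes>0:
--         voisins.append(node - 1)
--     if node % nb_colonnes < nb_colonnes-1:
--         voisins.append(node + 1)
--     if node>nb_colonnes-1:
--         voisins.append(node - nb_colonnes)
--     if node<nb_colonnes*nb_lignes - nb_colonnes:
--         voisins.append(node + nb_colonnes)
--     return voisins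
--
-- def trouve_liaisons(nodes:list, arretes:list, valeur_noeuds:dict, nb_lignes:int, nb_colonnes:int) -> dict:
--     """ Met la même valeur a tout les noeuds qui sont reliés
--         Renvoie le dictionnaire qui contient les valeurs de chaque noeud"""
--     v_n = 0
--     while v_n != valeur_noeuds:
--         v_n = valeur_noeuds.copy()
--
--         for node in nodes:
--             for voisin in trouve_voisin(node, nb_lignes, nb_colonnes):
--                 if (voisin, node) in arretes or (node, voisin) in arretes:
--                     if valeur_noeuds[node] >valeur_noeuds[voisin]:
--                         valeur_noeuds[node] = valeur_noeuds[voisin]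
--                     else:
--                         valeur_noeuds[voisin] = valeur_noeuds[node]
--     return valeur_noeuds
-- ===== SOURCE B (Python) =====
-- def trouve_voisin(node: int, nb_lignes: int, nb_colonnes: int) -> list:
--     """Renvoie la liste de tout les voisins du noeud mis en paramètre"""
--     voisins = []
--     if node % nb_colonnes > 0:
--         voisins.append(node - 1)
--     if node % nb_colonnes < nb_colonnes - 1:
--         voisins.append(node + 1)
--     if node > nb_colonnes - 1:
--         voisins.append(node - nb_colonnes)
--     if node < nb_colonnes * nb_lignes - nb_colonnes:
--         voisins.append(node + nb_colonnes)
--     return voisins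
--
--
-- def trouve_liaisons(nodes: list, arretes: list, valeur_noeuds: dict, nb_lignes: int, nb_colonnes: int) -> dict:
--     """Single pass over the effective edges merging component labels, then one
--     min computation per node: no fixpoint iteration over the whole graph."""
--     arete_set = set(arretes)
--     label = {k: k for k in valeur_noeuds}
--     for node in nodes:
--         for voisin in trouve_voisin(node, nb_lignes, nb_colonnes):
--             if (voisin, node) in arete_set or (node, voisin) in arete_set:
--                 a, b = label[node], label[voisin]
--                 if a != b:
--                     label = {k: (a if w == b else w) for k, w in label.items()}
--     best = {}
--     for k2, w in valeur_noeuds.items():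
--         r = label[k2]
--         if r not in best or w < best[r]:
--             best[r] = w
--     return {k: best[label[k]] for k in valeur_noeuds}
-- ===== Notes on version B (the rewrite author's own statement) =====
-- stated objective: faster
-- what changed: B replaces A's iterate-passes-until-fixpoint value propagation with a single sweep over the effective edges that merges component labels (union by relabelling), a one-pass per-label minimum dict, and set-based edge membership instead of A's O(E) list scans.
import Mathlib
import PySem

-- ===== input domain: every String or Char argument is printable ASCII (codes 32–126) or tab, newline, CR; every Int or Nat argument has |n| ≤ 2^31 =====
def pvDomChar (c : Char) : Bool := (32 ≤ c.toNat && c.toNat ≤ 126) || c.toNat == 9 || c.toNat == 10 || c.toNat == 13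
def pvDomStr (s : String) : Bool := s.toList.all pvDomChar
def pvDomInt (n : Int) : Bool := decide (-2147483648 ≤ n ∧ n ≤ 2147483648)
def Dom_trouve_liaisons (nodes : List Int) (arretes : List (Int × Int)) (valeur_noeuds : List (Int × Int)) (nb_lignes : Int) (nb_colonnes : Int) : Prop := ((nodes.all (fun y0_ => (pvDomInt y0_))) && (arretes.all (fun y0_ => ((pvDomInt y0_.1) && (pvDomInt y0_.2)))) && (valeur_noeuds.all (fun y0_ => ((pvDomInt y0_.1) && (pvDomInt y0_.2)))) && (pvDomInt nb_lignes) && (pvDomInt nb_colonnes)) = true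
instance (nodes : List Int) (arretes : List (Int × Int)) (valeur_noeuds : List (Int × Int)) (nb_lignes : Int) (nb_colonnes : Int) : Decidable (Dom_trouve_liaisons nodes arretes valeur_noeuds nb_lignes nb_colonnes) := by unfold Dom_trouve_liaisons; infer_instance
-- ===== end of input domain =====

-- B replaces A's iterate-until-fixpoint min-propagation by one sweep over the effective
-- edges merging component labels, then one component-minimum per node (faster).
-- A mutates and returns the dict passed as valeur_noeuds; B builds a fresh dict:
-- the equivalence proved here is about the RETURN value only.

-- ===== PORT A =====
def trouve_voisin (node : Int) (nb_lignes : Int) (nb_colonnes : Int) : List Int :=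
  let voisins : List Int := []
  let voisins := if PySem.Int.mod node nb_colonnes > 0 then voisins ++ [node - 1] else voisins
  let voisins := if PySem.Int.mod node nb_colonnes < nb_colonnes - 1 then voisins ++ [node + 1] else voisins
  let voisins := if node > nb_colonnes - 1 then voisins ++ [node - nb_colonnes] else voisins
  let voisins := if node < nb_colonnes * nb_lignes - nb_colonnes then voisins ++ [node + nb_colonnes] else voisins
  voisins

-- '(voisin, node) in arretes or (node, voisin) in arretes' (list membership)
def pvEdge (arretes : List (Int × Int)) (node voisin : Int) : Bool :=
  arretes.contains (voisin, node) || arretes.contains (node, voisin)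

-- the body of A's innermost 'if': compare valeur_noeuds[node] with valeur_noeuds[voisin]
-- and overwrite one of them with the smaller value (a missing key is Python's KeyError,
-- excluded by Pre_; the port then leaves the dict unchanged)
def pvUpdA (d : PySem.Dict Int Int) (node voisin : Int) : PySem.Dict Int Int :=
  match d.get? node, d.get? voisin with
  | some a, some b => if a > b then d.insert node b else d.insert voisin a
  | _, _ => d

-- one full 'for node in nodes: for voisin in …' pass of A's while-body
def pvPassA (nodes : List Int) (arretes : List (Int × Int)) (nb_lignes nb_colonnes : Int) (d : PySem.Dict Int Int) : PySem.Dict Int Int :=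
  nodes.foldl (fun d node =>
    (trouve_voisin node nb_lignes nb_colonnes).foldl (fun d voisin =>
      if pvEdge arretes node voisin then pvUpdA d node voisin else d) d) d

-- A's 'while v_n != valeur_noeuds' loop: run a pass, stop when the dict is unchanged.
-- (keys and their order never change, so Python's order-insensitive dict == is list =.)
-- The fuel only makes the recursion structural: pvMu strictly decreases with each
-- repeated pass, and pvLoopA_fix below proves the initial fuel is never exhausted.
def pvLoopA (nodes : List Int) (arretes : List (Int × Int)) (nb_lignes nb_colonnes : Int) (fuel : Nat) (d : PySem.Dict Int Int) : PySem.Dict Int Int :=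
  match fuel with
  | 0 => d
  | fuel + 1 =>
    let d' := pvPassA nodes arretes nb_lignes nb_colonnes d
    if d' = d then d' else pvLoopA nodes arretes nb_lignes nb_colonnes fuel d'

def trouve_liaisons (nodes : List Int) (arretes : List (Int × Int)) (valeur_noeuds : List (Int × Int)) (nb_lignes : Int) (nb_colonnes : Int) : List (Int × Int) :=
  (pvLoopA nodes arretes nb_lignes nb_colonnes (valeur_noeuds.length * valeur_noeuds.length + 1) (PySem.Dict.mk valeur_noeuds)).items

-- ===== PORT B =====
-- "a, b = label[node], label[voisin]; if a != b: label = {k: (a if w == b else w) …}"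
-- (a missing key is Python's KeyError, excluded by Pre_; the port leaves label unchanged)
def pvUnionStep (lab : PySem.Dict Int Int) (node voisin : Int) : PySem.Dict Int Int :=
  match lab.get? node, lab.get? voisin with
  | some a, some b =>
    if a ≠ b then PySem.Dict.mk (lab.items.map (fun p => (p.1, if p.2 = b then a else p.2))) else lab
  | _, _ => lab

-- "r = label[k2]; if r not in best or w < best[r]: best[r] = w" ('r not in best' rendered
-- as the get? match; label[k2] raising KeyError is excluded by Pre_, the port then skips)
def pvBestStep (label : PySem.Dict Int Int) (best : PySem.Dict Int Int) (q : Int × Int) : PySem.Dict Int Int :=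
  match label.get? q.1 with
  | some r =>
    match best.get? r with
    | none => best.insert r q.2
    | some m => if q.2 < m then best.insert r q.2 else best
  | none => best

def trouve_liaisons_alt (nodes : List Int) (arretes : List (Int × Int)) (valeur_noeuds : List (Int × Int)) (nb_lignes : Int) (nb_colonnes : Int) : List (Int × Int) :=
  let arete_set : PySem.Set (Int × Int) := PySem.Set.ofList arretes
  -- {k: k for k in valeur_noeuds} (dict keys are distinct, so the comprehension is a map)
  let label0 : PySem.Dict Int Int := PySem.Dict.mk (valeur_noeuds.map (fun p => (p.1, p.1)))
  let label := nodes.foldl (fun lab node =>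
    (trouve_voisin node nb_lignes nb_colonnes).foldl (fun lab voisin =>
      if arete_set.contains (voisin, node) || arete_set.contains (node, voisin)
      then pvUnionStep lab node voisin else lab) lab) label0
  let best := valeur_noeuds.foldl (fun best q => pvBestStep label best q) PySem.Dict.empty
  -- {k: best[label[k]] for k in valeur_noeuds} (distinct keys, so the comprehension is a
  -- map; under Pre_ both lookups always hit, so the 0 defaults are never used)
  valeur_noeuds.map (fun p => (p.1,
    match label.get? p.1 with
    | some r => best.getD r 0
    | none => 0))

-- ===== PRECONDITION & SPEC =====
-- Pre_ excludes exactly the inputs where the Python A raises — ZeroDivisionError when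
-- nb_colonnes = 0 with nodes nonempty, KeyError when an endpoint of an effective edge is
-- missing from valeur_noeuds — plus association lists with duplicate keys, which no
-- Python dict argument can produce.
def Pre_trouve_liaisons (nodes : List Int) (arretes : List (Int × Int)) (valeur_noeuds : List (Int × Int)) (nb_lignes : Int) (nb_colonnes : Int) : Prop :=
  (valeur_noeuds.map Prod.fst).Nodup ∧
  (nodes ≠ [] → nb_colonnes ≠ 0) ∧
  ∀ node ∈ nodes, ∀ voisin ∈ trouve_voisin node nb_lignes nb_colonnes,
    pvEdge arretes node voisin = true →
      node ∈ valeur_noeuds.map Prod.fst ∧ voisin ∈ valeur_noeuds.map Prod.fst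
instance (nodes : List Int) (arretes : List (Int × Int)) (valeur_noeuds : List (Int × Int)) (nb_lignes : Int) (nb_colonnes : Int) : Decidable (Pre_trouve_liaisons nodes arretes valeur_noeuds nb_lignes nb_colonnes) := by unfold Pre_trouve_liaisons; infer_instance

def pvWitness_trouve_liaisons : List Int × (List (Int × Int)) × (List (Int × Int)) × Int × Int :=
  ([0, 1], [(0, 1)], [(0, 5), (1, 3)], 1, 2)

def Spec_trouve_liaisons (nodes : List Int) (arretes : List (Int × Int)) (valeur_noeuds : List (Int × Int)) (nb_lignes : Int) (nb_colonnes : Int) (out : List (Int × Int)) : Prop := out = trouve_liaisons_alt nodes arretes valeur_noeuds nb_lignes nb_colonnes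
instance (nodes : List Int) (arretes : List (Int × Int)) (valeur_noeuds : List (Int × Int)) (nb_lignes : Int) (nb_colonnes : Int) (out : List (Int × Int)) : Decidable (Spec_trouve_liaisons nodes arretes valeur_noeuds nb_lignes nb_colonnes out) := by unfold Spec_trouve_liaisons; infer_instance

-- ===== CLAIM (what is proved, stated in full; the proofs are below) =====
def Claim_equal_trouve_liaisons : Prop := ∀ (nodes : List Int) (arretes : List (Int × Int)) (valeur_noeuds : List (Int × Int)) (nb_lignes : Int) (nb_colonnes : Int), Dom_trouve_liaisons nodes arretes valeur_noeuds nb_lignes nb_colonnes → Pre_trouve_liaisons nodes arretes valeur_noeuds nb_lignes nb_colonnes → Spec_trouve_liaisons nodes arretes valeur_noeuds nb_lignes nb_colonnes (trouve_liaisons nodes arretes valeur_noeuds nb_lignes nb_colonnes)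

-- ===== LEMMAS AND PROOFS =====

-- the sequence of (node, voisin) pairs both programs act on, in program order
def pvPairs (nodes : List Int) (arretes : List (Int × Int)) (nb_lignes nb_colonnes : Int) : List (Int × Int) :=
  nodes.flatMap (fun node =>
    ((trouve_voisin node nb_lignes nb_colonnes).filter (fun voisin => pvEdge arretes node voisin)).map
      (fun voisin => (node, voisin)))

-- the connectivity relation generated by the pair sequence
def pvRel (P : List (Int × Int)) (x y : Int) : Prop := (x, y) ∈ P
def pvECl (P : List (Int × Int)) (x y : Int) : Prop := Relation.EqvGen (pvRel P) x y

-- "m is the minimum initial value on the component of x"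
def pvIsCMin (P vd : List (Int × Int)) (x m : Int) : Prop :=
  (∃ q ∈ vd, pvECl P q.1 x ∧ q.2 = m) ∧ ∀ q ∈ vd, pvECl P q.1 x → m ≤ q.2

-- ---- generic EqvGen lemmas ----
theorem pv_eqvgen_iff_of_rel_iff {α : Type} (R S : α → α → Prop) (h : ∀ a b, R a b ↔ S a b) (u v : α) :
    Relation.EqvGen R u v ↔ Relation.EqvGen S u v := by
  constructor <;> intro hg
  · exact Relation.EqvGen.mono (fun a b hab => (h a b).mp hab) hg
  · exact Relation.EqvGen.mono (fun a b hab => (h a b).mpr hab) hg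

theorem pv_eqvgen_bot {α : Type} (u v : α) : Relation.EqvGen (fun _ _ => False) u v ↔ u = v := by
  constructor
  · intro h; induction h with
    | rel _ _ h => exact h.elim
    | refl => rfl
    | symm _ _ _ ih => exact ih.symm
    | trans _ _ _ _ _ ih1 ih2 => exact ih1.trans ih2
  · rintro rfl; exact Relation.EqvGen.refl u

theorem pv_eqvgen_snoc {α : Type} (R : α → α → Prop) (x y u v : α) :
    Relation.EqvGen (fun p q => R p q ∨ (p = x ∧ q = y)) u v ↔
      (Relation.EqvGen R u v ∨ (Relation.EqvGen R u x ∧ Relation.EqvGen R y v) ∨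
        (Relation.EqvGen R u y ∧ Relation.EqvGen R x v)) := by
  constructor
  · intro h
    induction h with
    | rel a b hab =>
      rcases hab with hab | ⟨rfl, rfl⟩
      · exact Or.inl (Relation.EqvGen.rel _ _ hab)
      · exact Or.inr (Or.inl ⟨Relation.EqvGen.refl _, Relation.EqvGen.refl _⟩)
    | refl a => exact Or.inl (Relation.EqvGen.refl a)
    | symm a b _ ih =>
      rcases ih with h | ⟨h1, h2⟩ | ⟨h1, h2⟩
      · exact Or.inl (Relation.EqvGen.symm _ _ h)
      · exact Or.inr (Or.inr ⟨Relation.EqvGen.symm _ _ h2, Relation.EqvGen.symm _ _ h1⟩)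
      · exact Or.inr (Or.inl ⟨Relation.EqvGen.symm _ _ h2, Relation.EqvGen.symm _ _ h1⟩)
    | trans a b c _ _ ih1 ih2 =>
      rcases ih1 with h | ⟨h1, h2⟩ | ⟨h1, h2⟩ <;>
        rcases ih2 with g | ⟨g1, g2⟩ | ⟨g1, g2⟩
      · exact Or.inl (Relation.EqvGen.trans _ _ _ h g)
      · exact Or.inr (Or.inl ⟨Relation.EqvGen.trans _ _ _ h g1, g2⟩)
      · exact Or.inr (Or.inr ⟨Relation.EqvGen.trans _ _ _ h g1, g2⟩)
      · exact Or.inr (Or.inl ⟨h1, Relation.EqvGen.trans _ _ _ h2 g⟩)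
      · exact Or.inr (Or.inl ⟨h1, g2⟩)
      · exact Or.inl (Relation.EqvGen.trans _ _ _ h1 g2)
      · exact Or.inr (Or.inr ⟨h1, Relation.EqvGen.trans _ _ _ h2 g⟩)
      · exact Or.inl (Relation.EqvGen.trans _ _ _ h1 g2)
      · exact Or.inr (Or.inr ⟨h1, g2⟩)
  · intro h
    have mono : ∀ {p q : α}, Relation.EqvGen R p q →
        Relation.EqvGen (fun p q => R p q ∨ (p = x ∧ q = y)) p q :=
      fun h => Relation.EqvGen.mono (fun a b hab => Or.inl hab) h
    have hxy : Relation.EqvGen (fun p q => R p q ∨ (p = x ∧ q = y)) x y :=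
      Relation.EqvGen.rel _ _ (Or.inr ⟨rfl, rfl⟩)
    rcases h with h | ⟨h1, h2⟩ | ⟨h1, h2⟩
    · exact mono h
    · exact Relation.EqvGen.trans _ _ _ (mono h1) (Relation.EqvGen.trans _ _ _ hxy (mono h2))
    · exact Relation.EqvGen.trans _ _ _ (mono h1) (Relation.EqvGen.trans _ _ _ (Relation.EqvGen.symm _ _ hxy) (mono h2))

-- ---- Dict lookup helpers ----
theorem pv_get?_mk_mapVal (l : List (Int × Int)) (f : Int → Int) (k : Int) :
    (PySem.Dict.mk (l.map (fun p => (p.1, f p.2)))).get? k = ((PySem.Dict.mk l).get? k).map f := by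
  induction l with
  | nil => rfl
  | cons p t ih =>
    obtain ⟨k1, v1⟩ := p
    simp only [List.map_cons, PySem.Dict.get?_mk_cons]
    by_cases h : (k1 == k) = true
    · simp [h]
    · simp [h, ih]

theorem pv_get?_mk_selfmap (l : List (Int × Int)) (k : Int) :
    (PySem.Dict.mk (l.map (fun p => (p.1, p.1)))).get? k = ((PySem.Dict.mk l).get? k).map (fun _ => k) := by
  induction l with
  | nil => rfl
  | cons p t ih =>
    obtain ⟨k1, v1⟩ := p
    simp only [List.map_cons, PySem.Dict.get?_mk_cons]
    by_cases h : (k1 == k) = true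
    · have hpk : k1 = k := eq_of_beq h
      simp [hpk]
    · simp [h, ih]

theorem pv_get?_isSome_of_mem_keys (d : PySem.Dict Int Int) (k : Int) (h : k ∈ d.items.map Prod.fst) :
    ∃ v, d.get? k = some v := by
  cases hv : d.get? k with
  | none => exact absurd h ((PySem.Dict.get?_eq_none_iff_not_mem_keys d k).mp hv)
  | some v => exact ⟨v, rfl⟩

-- ---- folds over the pair sequence ----
theorem pv_passA_eq_foldl (nodes : List Int) (arretes : List (Int × Int)) (nb_lignes nb_colonnes : Int) (d : PySem.Dict Int Int) :
    pvPassA nodes arretes nb_lignes nb_colonnes d =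
      (pvPairs nodes arretes nb_lignes nb_colonnes).foldl (fun d p => pvUpdA d p.1 p.2) d := by
  unfold pvPassA pvPairs
  rw [List.foldl_flatMap]
  have hfun : ∀ (acc : PySem.Dict Int Int) (node : Int),
      (((trouve_voisin node nb_lignes nb_colonnes).filter (fun voisin => pvEdge arretes node voisin)).map
        (fun voisin => (node, voisin))).foldl (fun d p => pvUpdA d p.1 p.2) acc =
      (trouve_voisin node nb_lignes nb_colonnes).foldl (fun d voisin =>
        if pvEdge arretes node voisin then pvUpdA d node voisin else d) acc := by
    intro acc node
    rw [List.foldl_map, PySem.List.foldl_if_eq_foldl_filter]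
  congr 1
  funext acc node
  exact (hfun acc node).symm

theorem pv_labelFold_eq_foldl (nodes : List Int) (arretes : List (Int × Int)) (nb_lignes nb_colonnes : Int) (lab : PySem.Dict Int Int) :
    nodes.foldl (fun lab node =>
      (trouve_voisin node nb_lignes nb_colonnes).foldl (fun lab voisin =>
        if (PySem.Set.ofList arretes).contains (voisin, node) || (PySem.Set.ofList arretes).contains (node, voisin)
        then pvUnionStep lab node voisin else lab) lab) lab =
      (pvPairs nodes arretes nb_lignes nb_colonnes).foldl (fun lab p => pvUnionStep lab p.1 p.2) lab := by
  unfold pvPairs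
  rw [List.foldl_flatMap]
  have hfun : ∀ (acc : PySem.Dict Int Int) (node : Int),
      (((trouve_voisin node nb_lignes nb_colonnes).filter (fun voisin => pvEdge arretes node voisin)).map
        (fun voisin => (node, voisin))).foldl (fun lab p => pvUnionStep lab p.1 p.2) acc =
      (trouve_voisin node nb_lignes nb_colonnes).foldl (fun lab voisin =>
        if (PySem.Set.ofList arretes).contains (voisin, node) || (PySem.Set.ofList arretes).contains (node, voisin)
        then pvUnionStep lab node voisin else lab) acc := by
    intro acc node
    rw [List.foldl_map, PySem.List.foldl_if_eq_foldl_filter]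
    have heq : (fun (voisin : Int) => (PySem.Set.ofList arretes).contains (voisin, node) || (PySem.Set.ofList arretes).contains (node, voisin)) = (fun voisin => pvEdge arretes node voisin) := by
      funext voisin
      simp [pvEdge, pysem, PySem.Set.contains]
    rw [heq]
  congr 1
  funext acc node
  exact (hfun acc node).symm

theorem pv_mem_pairs_endpoints (nodes : List Int) (arretes : List (Int × Int)) (valeur_noeuds : List (Int × Int)) (nb_lignes nb_colonnes : Int)
    (hpre : Pre_trouve_liaisons nodes arretes valeur_noeuds nb_lignes nb_colonnes) :
    ∀ p ∈ pvPairs nodes arretes nb_lignes nb_colonnes,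
      p.1 ∈ valeur_noeuds.map Prod.fst ∧ p.2 ∈ valeur_noeuds.map Prod.fst := by
  intro p hp
  unfold pvPairs at hp
  simp only [List.mem_flatMap, List.mem_map, List.mem_filter] at hp
  obtain ⟨node, hnode, voisin, ⟨hv, he⟩, rfl⟩ := hp
  exact hpre.2.2 node hnode voisin hv he

-- with distinct keys an entry is determined by its key
theorem pv_mem_eq_of_nodup (l : List (Int × Int)) (hk : (l.map Prod.fst).Nodup)
    {p q : Int × Int} (hp : p ∈ l) (hq : q ∈ l) (hfst : p.1 = q.1) : p = q := by
  obtain ⟨i, hi, rfl⟩ := List.mem_iff_getElem.mp hp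
  obtain ⟨j, hj, rfl⟩ := List.mem_iff_getElem.mp hq
  have hmi : i < (l.map Prod.fst).length := by simpa using hi
  have hmj : j < (l.map Prod.fst).length := by simpa using hj
  have hij : i = j := by
    have : (l.map Prod.fst)[i]'hmi = (l.map Prod.fst)[j]'hmj := by simpa using hfst
    exact (List.Nodup.getElem_inj_iff hk).mp this
  subst hij
  rfl

theorem pv_items_insert_fst (d : PySem.Dict Int Int) (k v : Int) (hc : d.contains k = true) :
    (d.insert k v).items.map Prod.fst = d.items.map Prod.fst := by
  rw [PySem.Dict.items_insert_of_contains d v hc, List.map_map]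
  apply List.map_congr_left
  intro p _
  by_cases h : (p.1 == k) = true
  · simp [Function.comp, (eq_of_beq h).symm]
  · simp [Function.comp, h]

theorem pv_contains_of_get?_eq_some (d : PySem.Dict Int Int) (k v : Int) (h : d.get? k = some v) :
    d.contains k = true := by
  rw [PySem.Dict.contains_eq_isSome_get?, h]
  rfl

-- ---- keys are invariant ----
theorem pv_updA_keys (d : PySem.Dict Int Int) (x y : Int) :
    (pvUpdA d x y).items.map Prod.fst = d.items.map Prod.fst := by
  unfold pvUpdA
  rcases hgx : d.get? x with _ | a <;> rcases hgy : d.get? y with _ | b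
  · rfl
  · rfl
  · rfl
  · show List.map Prod.fst (if a > b then d.insert x b else d.insert y a).items =
      List.map Prod.fst d.items
    split
    · exact pv_items_insert_fst d x b (pv_contains_of_get?_eq_some d x a hgx)
    · exact pv_items_insert_fst d y a (pv_contains_of_get?_eq_some d y b hgy)

theorem pv_foldl_updA_keys (Q : List (Int × Int)) (d : PySem.Dict Int Int) :
    ((Q.foldl (fun d p => pvUpdA d p.1 p.2) d).items.map Prod.fst) = d.items.map Prod.fst := by
  induction Q generalizing d with
  | nil => rfl
  | cons p rest ih =>
    rw [List.foldl_cons, ih, pv_updA_keys]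

-- ---- descent order on the value lists (values only ever shrink) ----
def pvDescV (l l' : List (Int × Int)) : Prop :=
  l'.map Prod.fst = l.map Prod.fst ∧
  (∀ (i : Nat) (h : i < l.length) (h' : i < l'.length), (l'[i]'h').2 ≤ (l[i]'h).2) ∧
  ∀ w ∈ l'.map Prod.snd, w ∈ l.map Prod.snd

theorem pv_descV_refl (l : List (Int × Int)) : pvDescV l l :=
  ⟨rfl, fun _ _ _ => le_refl _, fun _ hw => hw⟩

theorem pv_descV_trans (l₁ l₂ l₃ : List (Int × Int)) (h1 : pvDescV l₁ l₂) (h2 : pvDescV l₂ l₃) : pvDescV l₁ l₃ := by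
  obtain ⟨hf1, hp1, hs1⟩ := h1
  obtain ⟨hf2, hp2, hs2⟩ := h2
  refine ⟨hf2.trans hf1, ?_, fun w hw => hs1 w (hs2 w hw)⟩
  intro i h h'
  have hl2 : l₂.length = l₁.length := by
    have := congrArg List.length hf1
    simpa using this
  have h2i : i < l₂.length := by omega
  exact le_trans (hp2 i h2i h') (hp1 i h h2i)

theorem pv_descV_antisymm (l l' : List (Int × Int)) (h : pvDescV l l') (h' : pvDescV l' l) : l = l' := by
  have hlen : l.length = l'.length := by
    have := congrArg List.length h.1
    simpa using this.symm
  apply List.ext_getElem hlen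
  intro i h1 h2
  have hfst : (l[i]'h1).1 = (l'[i]'h2).1 := by
    have := congrArg (fun t => t.getD i 0) h.1
    simpa [List.getD_eq_getElem, h1, h2] using this.symm
  have hsnd : (l[i]'h1).2 = (l'[i]'h2).2 :=
    le_antisymm (h'.2.1 i h2 h1) (h.2.1 i h1 h2)
  exact Prod.ext hfst hsnd

-- inserting a smaller value (itself already present) at an existing key only shrinks values
theorem pv_descV_insert (d : PySem.Dict Int Int) (hk : (d.items.map Prod.fst).Nodup)
    (k vOld w : Int) (hmem : (k, vOld) ∈ d.items) (hle : w ≤ vOld) (hwval : w ∈ d.items.map Prod.snd) :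
    pvDescV d.items (d.insert k w).items := by
  have hknd : d.keys.Nodup := hk
  have hc : d.contains k = true :=
    pv_contains_of_get?_eq_some d k vOld (PySem.Dict.get?_of_mem_items d hmem hknd)
  have hfst := pv_items_insert_fst d k w hc
  rw [PySem.Dict.items_insert_of_contains d w hc] at hfst ⊢
  refine ⟨hfst, ?_, ?_⟩
  · intro i h h'
    rw [List.getElem_map]
    by_cases hb : (d.items[i].1 == k) = true
    · have heq : d.items[i] = (k, vOld) :=
        pv_mem_eq_of_nodup d.items hk (List.getElem_mem h) hmem (by simpa using eq_of_beq hb)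
      simp only [hb, if_pos]
      rw [heq]
      exact hle
    · simp only [hb]
      simp
  · intro w' hw'
    rw [List.map_map] at hw'
    obtain ⟨q, hq, hval⟩ := List.mem_map.mp hw'
    by_cases hb : (q.1 == k) = true
    · simp only [Function.comp, hb, if_pos] at hval
      exact hval ▸ hwval
    · simp only [Function.comp, hb] at hval
      simp only [Bool.false_eq_true, if_false] at hval
      rw [← hval]
      exact List.mem_map_of_mem hq

theorem pv_descV_updA (d : PySem.Dict Int Int) (x y : Int) (hk : (d.items.map Prod.fst).Nodup) :
    pvDescV d.items (pvUpdA d x y).items := by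
  unfold pvUpdA
  rcases hgx : d.get? x with _ | a <;> rcases hgy : d.get? y with _ | b
  · exact pv_descV_refl _
  · exact pv_descV_refl _
  · exact pv_descV_refl _
  · show pvDescV d.items (if a > b then d.insert x b else d.insert y a).items
    have hmx : (x, a) ∈ d.items := PySem.Dict.mem_items_of_get?_eq_some d hgx
    have hmy : (y, b) ∈ d.items := PySem.Dict.mem_items_of_get?_eq_some d hgy
    split_ifs with hab
    · exact pv_descV_insert d hk x a b hmx (le_of_lt hab) (List.mem_map_of_mem hmy)
    · exact pv_descV_insert d hk y b a hmy (not_lt.mp hab) (List.mem_map_of_mem hmx)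

theorem pv_descV_foldl (Q : List (Int × Int)) (d : PySem.Dict Int Int) (hk : (d.items.map Prod.fst).Nodup) :
    pvDescV d.items ((Q.foldl (fun d p => pvUpdA d p.1 p.2) d).items) := by
  induction Q generalizing d with
  | nil => exact pv_descV_refl _
  | cons p rest ih =>
    rw [List.foldl_cons]
    have hk' : ((pvUpdA d p.1 p.2).items.map Prod.fst).Nodup := by
      rw [pv_updA_keys]; exact hk
    exact pv_descV_trans _ _ _ (pv_descV_updA d p.1 p.2 hk) (ih _ hk')

-- ---- the termination measure ----
def pvMu (l : List (Int × Int)) : Nat :=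
  ∑ i ∈ Finset.range l.length, (((l.map Prod.snd).toFinset).filter (fun w => w < (l.map Prod.snd).getD i 0)).card

theorem pv_mu_lt (l l' : List (Int × Int)) (h : pvDescV l l') (hne : l' ≠ l) : pvMu l' < pvMu l := by
  obtain ⟨hf, hp, hs⟩ := h
  have hlen : l'.length = l.length := by
    have := congrArg List.length hf
    simpa using this
  have hVsub : (l'.map Prod.snd).toFinset ⊆ (l.map Prod.snd).toFinset := by
    intro w hw
    rw [List.mem_toFinset] at *
    exact hs w hw
  have hgetD : ∀ (t : List (Int × Int)) (i : Nat) (hi : i < t.length),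
      (t.map Prod.snd).getD i 0 = (t[i]'hi).2 := by
    intro t i hi
    rw [List.getD_eq_getElem _ _ (by simpa using hi), List.getElem_map]
  have hfsti : ∀ (i : Nat) (h1 : i < l'.length) (h2 : i < l.length), (l'[i]'h1).1 = (l[i]'h2).1 := by
    intro i h1 h2
    have := congrArg (fun t => t.getD i 0) hf
    simpa [List.getD_eq_getElem, h1, h2] using this
  have hsub : ∀ i (h2 : i < l.length) (h1 : i < l'.length),
      ((l'.map Prod.snd).toFinset.filter (fun w => w < (l'.map Prod.snd).getD i 0)) ⊆
      ((l.map Prod.snd).toFinset.filter (fun w => w < (l.map Prod.snd).getD i 0)) := by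
    intro i h2 h1 w hw
    rw [Finset.mem_filter] at *
    refine ⟨hVsub hw.1, ?_⟩
    have hle : (l'.map Prod.snd).getD i 0 ≤ (l.map Prod.snd).getD i 0 := by
      rw [hgetD l' i h1, hgetD l i h2]
      exact hp i h2 h1
    exact lt_of_lt_of_le hw.2 hle
  have hex : ∃ i, ∃ (hi : i < l.length), (l'[i]'(by omega)).2 < (l[i]'hi).2 := by
    by_contra hall
    push Not at hall
    apply hne
    apply List.ext_getElem hlen
    intro i h1 h2
    refine Prod.ext (hfsti i h1 h2) (le_antisymm (hp i h2 h1) ?_)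
    simpa using hall i h2
  obtain ⟨j, hj, hjlt⟩ := hex
  unfold pvMu
  rw [hlen]
  apply Finset.sum_lt_sum
  · intro i hi
    rw [Finset.mem_range] at hi
    exact Finset.card_le_card (hsub i hi (by omega))
  · refine ⟨j, Finset.mem_range.mpr hj, ?_⟩
    apply Finset.card_lt_card
    rw [Finset.ssubset_iff_of_subset (hsub j hj (by omega))]
    refine ⟨(l'[j]'(by omega)).2, ?_, ?_⟩
    · rw [Finset.mem_filter]
      constructor
      · rw [List.mem_toFinset]
        exact hs _ (List.mem_map_of_mem (List.getElem_mem _))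
      · rw [hgetD l j hj]
        exact hjlt
    · rw [Finset.mem_filter]
      intro hcon
      rw [hgetD l' j (by omega)] at hcon
      exact lt_irrefl _ hcon.2

theorem pv_mu_le (l : List (Int × Int)) : pvMu l ≤ l.length * l.length := by
  unfold pvMu
  calc ∑ i ∈ Finset.range l.length, (((l.map Prod.snd).toFinset).filter (fun w => w < (l.map Prod.snd).getD i 0)).card
      ≤ ∑ _i ∈ Finset.range l.length, l.length := by
        apply Finset.sum_le_sum
        intro i _
        calc (((l.map Prod.snd).toFinset).filter _).card
            ≤ (l.map Prod.snd).toFinset.card := Finset.card_le_card (Finset.filter_subset _ _)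
          _ ≤ (l.map Prod.snd).length := List.toFinset_card_le _
          _ = l.length := by simp
    _ = l.length * l.length := by
        simp [Finset.sum_const, Finset.card_range]

theorem pv_loopA_fix (nodes : List Int) (arretes : List (Int × Int)) (nb_lignes nb_colonnes : Int) (fuel : Nat) (d : PySem.Dict Int Int)
    (hk : (d.items.map Prod.fst).Nodup) (hfuel : pvMu d.items < fuel) :
    pvPassA nodes arretes nb_lignes nb_colonnes (pvLoopA nodes arretes nb_lignes nb_colonnes fuel d) =
      pvLoopA nodes arretes nb_lignes nb_colonnes fuel d := by
  induction fuel generalizing d with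
  | zero => omega
  | succ fuel ih =>
    by_cases hd : pvPassA nodes arretes nb_lignes nb_colonnes d = d
    · simp only [pvLoopA, hd, if_pos]
    · simp only [pvLoopA, hd]
      apply ih
      · rw [pv_passA_eq_foldl, pv_foldl_updA_keys]
        exact hk
      · have hdesc : pvDescV d.items (pvPassA nodes arretes nb_lignes nb_colonnes d).items := by
          rw [pv_passA_eq_foldl]
          exact pv_descV_foldl _ d hk
        have hne : (pvPassA nodes arretes nb_lignes nb_colonnes d).items ≠ d.items := by
          intro hcon
          exact hd (PySem.Dict.ext hcon)
        have := pv_mu_lt d.items (pvPassA nodes arretes nb_lignes nb_colonnes d).items hdesc hne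
        omega

-- ---- the A-side invariant ----
def pvInvA (P vd : List (Int × Int)) (d : PySem.Dict Int Int) : Prop :=
  d.items.map Prod.fst = vd.map Prod.fst ∧
  (∀ q ∈ d.items, ∃ r ∈ vd, pvECl P r.1 q.1 ∧ r.2 = q.2) ∧
  (∀ k m, k ∈ vd.map Prod.fst → pvIsCMin P vd k m → ∃ q ∈ d.items, pvECl P q.1 k ∧ q.2 = m)

theorem pv_invA_init (P vd : List (Int × Int)) : pvInvA P vd (PySem.Dict.mk vd) := by
  refine ⟨rfl, fun q hq => ⟨q, hq, Relation.EqvGen.refl _, rfl⟩, fun k m _ hmin => ?_⟩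
  obtain ⟨q, hq, hcl, hqm⟩ := hmin.1
  exact ⟨q, hq, hcl, hqm⟩

theorem pv_invA_upd (P vd : List (Int × Int)) (d : PySem.Dict Int Int) (x y : Int)
    (hK : (vd.map Prod.fst).Nodup) (hxy : (x, y) ∈ P) (hinv : pvInvA P vd d) :
    pvInvA P vd (pvUpdA d x y) := by
  obtain ⟨hkeys, hval, hmin⟩ := hinv
  have hdk : (d.items.map Prod.fst).Nodup := by rw [hkeys]; exact hK
  have hclxy : pvECl P x y := Relation.EqvGen.rel _ _ hxy
  unfold pvUpdA
  rcases hgx : d.get? x with _ | a <;> rcases hgy : d.get? y with _ | b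
  · exact ⟨hkeys, hval, hmin⟩
  · exact ⟨hkeys, hval, hmin⟩
  · exact ⟨hkeys, hval, hmin⟩
  · show pvInvA P vd (if a > b then d.insert x b else d.insert y a)
    have hmx : (x, a) ∈ d.items := PySem.Dict.mem_items_of_get?_eq_some d hgx
    have hmy : (y, b) ∈ d.items := PySem.Dict.mem_items_of_get?_eq_some d hgy
    split_ifs with hab
    · refine ⟨?_, ?_, ?_⟩
      · rw [pv_items_insert_fst d x b (pv_contains_of_get?_eq_some d x a hgx)]
        exact hkeys
      · intro q' hq'
        rw [PySem.Dict.mem_items_insert] at hq'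
        rcases hq' with rfl | ⟨hq', _⟩
        · obtain ⟨r, hr, hrcl, hrv⟩ := hval (y, b) hmy
          exact ⟨r, hr, Relation.EqvGen.trans _ _ _ hrcl (Relation.EqvGen.symm _ _ hclxy), hrv⟩
        · exact hval q' hq'
      · intro k m hk hcm
        obtain ⟨q, hq, hqcl, hqm⟩ := hmin k m hk hcm
        by_cases hqx : q.1 = x
        · exfalso
          have hqa : q = (x, a) := pv_mem_eq_of_nodup d.items hdk hq hmx hqx
          obtain ⟨r, hr, hrcl, hrv⟩ := hval (y, b) hmy
          have hrk : pvECl P r.1 k := by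
            refine Relation.EqvGen.trans _ _ _ hrcl ?_
            refine Relation.EqvGen.trans _ _ _ (Relation.EqvGen.symm _ _ hclxy) ?_
            rw [← hqx]
            exact hqcl
          have hmb : m ≤ r.2 := hcm.2 r hr hrk
          rw [hrv] at hmb
          rw [hqa] at hqm
          simp at hqm
          omega
        · refine ⟨q, ?_, hqcl, hqm⟩
          rw [PySem.Dict.mem_items_insert]
          exact Or.inr ⟨hq, hqx⟩
    · have hba : a ≤ b := not_lt.mp hab
      refine ⟨?_, ?_, ?_⟩
      · rw [pv_items_insert_fst d y a (pv_contains_of_get?_eq_some d y b hgy)]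
        exact hkeys
      · intro q' hq'
        rw [PySem.Dict.mem_items_insert] at hq'
        rcases hq' with rfl | ⟨hq', _⟩
        · obtain ⟨r, hr, hrcl, hrv⟩ := hval (x, a) hmx
          exact ⟨r, hr, Relation.EqvGen.trans _ _ _ hrcl hclxy, hrv⟩
        · exact hval q' hq'
      · intro k m hk hcm
        obtain ⟨q, hq, hqcl, hqm⟩ := hmin k m hk hcm
        by_cases hqy : q.1 = y
        · have hqb : q = (y, b) := pv_mem_eq_of_nodup d.items hdk hq hmy hqy
          obtain ⟨r, hr, hrcl, hrv⟩ := hval (x, a) hmx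
          have hrk : pvECl P r.1 k := by
            refine Relation.EqvGen.trans _ _ _ hrcl ?_
            refine Relation.EqvGen.trans _ _ _ hclxy ?_
            rw [← hqy]
            exact hqcl
          have hma : m ≤ r.2 := hcm.2 r hr hrk
          rw [hrv] at hma
          rw [hqb] at hqm
          simp at hqm
          have ham : a = m := by omega
          refine ⟨(y, a), ?_, ?_, ham⟩
          · rw [PySem.Dict.mem_items_insert]
            exact Or.inl rfl
          · show pvECl P y k
            rw [← hqy]
            exact hqcl
        · refine ⟨q, ?_, hqcl, hqm⟩
          rw [PySem.Dict.mem_items_insert]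
          exact Or.inr ⟨hq, hqy⟩

theorem pv_invA_foldl (P vd : List (Int × Int)) (Q : List (Int × Int)) (d : PySem.Dict Int Int)
    (hK : (vd.map Prod.fst).Nodup) (hQ : ∀ p ∈ Q, p ∈ P) (hinv : pvInvA P vd d) :
    pvInvA P vd (Q.foldl (fun d p => pvUpdA d p.1 p.2) d) := by
  induction Q generalizing d with
  | nil => exact hinv
  | cons p rest ih =>
    rw [List.foldl_cons]
    refine ih _ (fun q hq => hQ q (List.mem_cons_of_mem p hq)) ?_
    exact pv_invA_upd P vd d p.1 p.2 hK (hQ p List.mem_cons_self) hinv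

theorem pv_invA_loopA (nodes : List Int) (arretes : List (Int × Int)) (vd : List (Int × Int)) (nb_lignes nb_colonnes : Int)
    (fuel : Nat) (d : PySem.Dict Int Int) (hK : (vd.map Prod.fst).Nodup)
    (hinv : pvInvA (pvPairs nodes arretes nb_lignes nb_colonnes) vd d) :
    pvInvA (pvPairs nodes arretes nb_lignes nb_colonnes) vd (pvLoopA nodes arretes nb_lignes nb_colonnes fuel d) := by
  induction fuel generalizing d with
  | zero => exact hinv
  | succ fuel ih =>
    have hpass : pvInvA (pvPairs nodes arretes nb_lignes nb_colonnes) vd (pvPassA nodes arretes nb_lignes nb_colonnes d) := by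
      rw [pv_passA_eq_foldl]
      exact pv_invA_foldl _ vd _ d hK (fun p hp => hp) hinv
    by_cases hd : pvPassA nodes arretes nb_lignes nb_colonnes d = d
    · simp only [pvLoopA, hd, if_pos]
      exact hinv
    · simp only [pvLoopA, hd]
      exact ih _ hpass

-- ---- fixpoint ⇒ values agree along every effective edge ----
theorem pv_foldl_fix_each (Q : List (Int × Int)) (d : PySem.Dict Int Int)
    (hk : (d.items.map Prod.fst).Nodup) (hfix : Q.foldl (fun d p => pvUpdA d p.1 p.2) d = d) :
    ∀ p ∈ Q, pvUpdA d p.1 p.2 = d := by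
  induction Q generalizing d with
  | nil => intro p hp; exact absurd hp (List.not_mem_nil)
  | cons p rest ih =>
    rw [List.foldl_cons] at hfix
    have hd1 : pvDescV d.items (pvUpdA d p.1 p.2).items := pv_descV_updA d p.1 p.2 hk
    have hd2 : pvDescV (pvUpdA d p.1 p.2).items ((rest.foldl (fun d p => pvUpdA d p.1 p.2) (pvUpdA d p.1 p.2)).items) := by
      refine pv_descV_foldl rest _ ?_
      rw [pv_updA_keys]
      exact hk
    rw [hfix] at hd2
    have hupd : pvUpdA d p.1 p.2 = d :=
      PySem.Dict.ext (pv_descV_antisymm d.items (pvUpdA d p.1 p.2).items hd1 hd2).symm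
    rw [hupd] at hfix
    intro q hq
    rcases List.mem_cons.mp hq with rfl | hq'
    · exact hupd
    · exact ih d hk hfix q hq'

theorem pv_updA_eq_imp_get_eq (d : PySem.Dict Int Int) (x y : Int)
    (hx : x ∈ d.items.map Prod.fst) (hy : y ∈ d.items.map Prod.fst) (h : pvUpdA d x y = d) :
    d.get? x = d.get? y := by
  obtain ⟨a, hga⟩ := pv_get?_isSome_of_mem_keys d x hx
  obtain ⟨b, hgb⟩ := pv_get?_isSome_of_mem_keys d y hy
  unfold pvUpdA at h
  rw [hga, hgb] at h
  replace h : (if a > b then d.insert x b else d.insert y a) = d := h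
  by_cases hab : a > b
  · rw [if_pos hab] at h
    have hb : d.get? x = some b := by
      rw [← h]
      exact PySem.Dict.get?_insert_self d x b
    rw [hga] at hb
    simp at hb
    omega
  · rw [if_neg hab] at h
    have ha : d.get? y = some a := by
      rw [← h]
      exact PySem.Dict.get?_insert_self d y a
    rw [hga, ha]

theorem pv_const_on_classes (P : List (Int × Int)) (d : PySem.Dict Int Int)
    (h : ∀ p ∈ P, d.get? p.1 = d.get? p.2) (u v : Int) (huv : pvECl P u v) :
    d.get? u = d.get? v := by
  induction huv with
  | rel a b hab => exact h (a, b) hab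
  | refl a => rfl
  | symm a b _ ih => exact ih.symm
  | trans a b c _ _ ih1 ih2 => exact ih1.trans ih2

-- ---- existence and uniqueness of the component minimum ----
theorem pv_cmin_exists (P vd : List (Int × Int)) (k : Int) (hk : k ∈ vd.map Prod.fst) :
    ∃ m, pvIsCMin P vd k m := by
  classical
  obtain ⟨q0, hq0, hq0k⟩ := List.mem_map.mp hk
  have hq0f : q0 ∈ vd.filter (fun q => decide (pvECl P q.1 k)) := by
    rw [List.mem_filter]
    refine ⟨hq0, decide_eq_true ?_⟩
    rw [hq0k]
    exact Relation.EqvGen.refl k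
  have hL : q0.2 ∈ (vd.filter (fun q => decide (pvECl P q.1 k))).map Prod.snd :=
    List.mem_map_of_mem hq0f
  cases hmin : PySem.List.min? ((vd.filter (fun q => decide (pvECl P q.1 k))).map Prod.snd) (fun w => w) with
  | none =>
    rw [PySem.List.min?_eq_none_iff] at hmin
    rw [hmin] at hL
    exact absurd hL (List.not_mem_nil)
  | some m =>
    refine ⟨m, ⟨?_, ?_⟩⟩
    · have hmem := PySem.List.min?_mem hmin
      obtain ⟨q, hqf, hqm⟩ := List.mem_map.mp hmem
      rw [List.mem_filter] at hqf
      exact ⟨q, hqf.1, of_decide_eq_true hqf.2, hqm⟩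
    · intro q hq hcl
      have hqL : q.2 ∈ (vd.filter (fun q => decide (pvECl P q.1 k))).map Prod.snd :=
        List.mem_map_of_mem (List.mem_filter.mpr ⟨hq, decide_eq_true hcl⟩)
      exact PySem.List.min?_isMin hmin q.2 hqL

theorem pv_cmin_unique (P vd : List (Int × Int)) (k m m' : Int)
    (h : pvIsCMin P vd k m) (h' : pvIsCMin P vd k m') : m = m' := by
  obtain ⟨q, hq, hcl, hqm⟩ := h'.1
  obtain ⟨r, hr, hrcl, hrm⟩ := h.1
  have h1 : m ≤ q.2 := h.2 q hq hcl
  have h2 : m' ≤ r.2 := h'.2 r hr hrcl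
  omega

-- ---- A's final dict holds the component minimum at every key ----
theorem pv_A_final (nodes : List Int) (arretes : List (Int × Int)) (valeur_noeuds : List (Int × Int)) (nb_lignes nb_colonnes : Int)
    (hpre : Pre_trouve_liaisons nodes arretes valeur_noeuds nb_lignes nb_colonnes) (k m : Int)
    (hk : k ∈ valeur_noeuds.map Prod.fst)
    (hget : (pvLoopA nodes arretes nb_lignes nb_colonnes (valeur_noeuds.length * valeur_noeuds.length + 1) (PySem.Dict.mk valeur_noeuds)).get? k = some m) :
    pvIsCMin (pvPairs nodes arretes nb_lignes nb_colonnes) valeur_noeuds k m := by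
  have hK : (valeur_noeuds.map Prod.fst).Nodup := hpre.1
  have hinv : pvInvA (pvPairs nodes arretes nb_lignes nb_colonnes) valeur_noeuds
      (pvLoopA nodes arretes nb_lignes nb_colonnes (valeur_noeuds.length * valeur_noeuds.length + 1) (PySem.Dict.mk valeur_noeuds)) :=
    pv_invA_loopA nodes arretes valeur_noeuds nb_lignes nb_colonnes _ _ hK
      (pv_invA_init _ valeur_noeuds)
  have hdfk : (pvLoopA nodes arretes nb_lignes nb_colonnes (valeur_noeuds.length * valeur_noeuds.length + 1) (PySem.Dict.mk valeur_noeuds)).items.map Prod.fst = valeur_noeuds.map Prod.fst := hinv.1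
  have hdfknd : ((pvLoopA nodes arretes nb_lignes nb_colonnes (valeur_noeuds.length * valeur_noeuds.length + 1) (PySem.Dict.mk valeur_noeuds)).items.map Prod.fst).Nodup := by
    rw [hdfk]; exact hK
  have hfix := pv_loopA_fix nodes arretes nb_lignes nb_colonnes _ (PySem.Dict.mk valeur_noeuds) hK
    (Nat.lt_succ_of_le (pv_mu_le valeur_noeuds))
  have heach := pv_foldl_fix_each (pvPairs nodes arretes nb_lignes nb_colonnes) _ hdfknd
    (by rw [← pv_passA_eq_foldl]; exact hfix)
  have hpair : ∀ p ∈ pvPairs nodes arretes nb_lignes nb_colonnes,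
      (pvLoopA nodes arretes nb_lignes nb_colonnes (valeur_noeuds.length * valeur_noeuds.length + 1) (PySem.Dict.mk valeur_noeuds)).get? p.1 =
      (pvLoopA nodes arretes nb_lignes nb_colonnes (valeur_noeuds.length * valeur_noeuds.length + 1) (PySem.Dict.mk valeur_noeuds)).get? p.2 := by
    intro p hp
    refine pv_updA_eq_imp_get_eq _ p.1 p.2 ?_ ?_ (heach p hp)
    · rw [hdfk]
      exact (pv_mem_pairs_endpoints nodes arretes valeur_noeuds nb_lignes nb_colonnes hpre p hp).1
    · rw [hdfk]
      exact (pv_mem_pairs_endpoints nodes arretes valeur_noeuds nb_lignes nb_colonnes hpre p hp).2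
  obtain ⟨m₀, hm₀⟩ := pv_cmin_exists (pvPairs nodes arretes nb_lignes nb_colonnes) valeur_noeuds k hk
  obtain ⟨q, hq, hqcl, hqm⟩ := hinv.2.2 k m₀ hk hm₀
  have hgq : (pvLoopA nodes arretes nb_lignes nb_colonnes (valeur_noeuds.length * valeur_noeuds.length + 1) (PySem.Dict.mk valeur_noeuds)).get? q.1 = some q.2 :=
    PySem.Dict.get?_of_mem_items _ hq hdfknd
  have hconst := pv_const_on_classes (pvPairs nodes arretes nb_lignes nb_colonnes) _ hpair q.1 k hqcl
  rw [hgq, hget] at hconst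
  have hq2 : q.2 = m := by simpa using hconst
  rw [← hqm, hq2] at hm₀
  exact hm₀

-- ---- the B-side invariant: equal labels ⇔ same component ----
def pvInvB (pre vd : List (Int × Int)) (lab : PySem.Dict Int Int) : Prop :=
  lab.items.map Prod.fst = vd.map Prod.fst ∧
  ∀ x y, x ∈ vd.map Prod.fst → y ∈ vd.map Prod.fst → (lab.get? x = lab.get? y ↔ pvECl pre x y)

theorem pv_invB_init (vd : List (Int × Int)) :
    pvInvB [] vd (PySem.Dict.mk (vd.map (fun p => (p.1, p.1)))) := by
  have hitems : (PySem.Dict.mk (vd.map (fun p => (p.1, p.1)))).items.map Prod.fst = vd.map Prod.fst := by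
    simp [List.map_map, Function.comp]
  refine ⟨hitems, fun u v hu hv => ?_⟩
  have hget : ∀ z : Int, z ∈ vd.map Prod.fst →
      (PySem.Dict.mk (vd.map (fun p => (p.1, p.1)))).get? z = some z := by
    intro z hz
    rw [pv_get?_mk_selfmap]
    obtain ⟨w, hw⟩ := pv_get?_isSome_of_mem_keys (PySem.Dict.mk vd) z hz
    rw [hw]
    rfl
  rw [hget u hu, hget v hv]
  have hbot : pvECl [] u v ↔ u = v := by
    refine Iff.trans ?_ (pv_eqvgen_bot u v)
    exact pv_eqvgen_iff_of_rel_iff (pvRel []) (fun _ _ => False) (by intro a b; simp [pvRel]) u v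
  rw [hbot]
  simp

theorem pv_invB_step (pre vd : List (Int × Int)) (lab : PySem.Dict Int Int) (x y : Int)
    (hx : x ∈ vd.map Prod.fst) (hy : y ∈ vd.map Prod.fst) (hinv : pvInvB pre vd lab) :
    pvInvB (pre ++ [(x, y)]) vd (pvUnionStep lab x y) := by
  obtain ⟨hkeys, hiff⟩ := hinv
  obtain ⟨a, hga⟩ := pv_get?_isSome_of_mem_keys lab x (by rw [hkeys]; exact hx)
  obtain ⟨b, hgb⟩ := pv_get?_isSome_of_mem_keys lab y (by rw [hkeys]; exact hy)
  have hreliff : ∀ u v : Int, pvRel (pre ++ [(x, y)]) u v ↔ (pvRel pre u v ∨ (u = x ∧ v = y)) := by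
    intro u v
    simp [pvRel, Prod.ext_iff]
  have hsnoc : ∀ u v : Int, pvECl (pre ++ [(x, y)]) u v ↔
      (pvECl pre u v ∨ (pvECl pre u x ∧ pvECl pre y v) ∨ (pvECl pre u y ∧ pvECl pre x v)) := by
    intro u v
    refine Iff.trans ?_ (pv_eqvgen_snoc (pvRel pre) x y u v)
    exact pv_eqvgen_iff_of_rel_iff _ _ hreliff u v
  unfold pvUnionStep
  rw [hga, hgb]
  show pvInvB (pre ++ [(x, y)]) vd
    (if a ≠ b then PySem.Dict.mk (lab.items.map (fun p => (p.1, if p.2 = b then a else p.2))) else lab)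
  by_cases hab : a = b
  · rw [if_neg (fun hne => hne hab)]
    refine ⟨hkeys, fun u v hu hv => ?_⟩
    have hxycl : pvECl pre x y := (hiff x y hx hy).mp (by rw [hga, hgb, hab])
    rw [hsnoc u v, hiff u v hu hv]
    constructor
    · exact Or.inl
    · rintro (h | ⟨h1, h2⟩ | ⟨h1, h2⟩)
      · exact h
      · exact Relation.EqvGen.trans _ _ _ h1 (Relation.EqvGen.trans _ _ _ hxycl h2)
      · exact Relation.EqvGen.trans _ _ _ h1 (Relation.EqvGen.trans _ _ _ (Relation.EqvGen.symm _ _ hxycl) h2)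
  · rw [if_pos hab]
    have hkeys' : (PySem.Dict.mk (lab.items.map (fun p => (p.1, if p.2 = b then a else p.2)))).items.map Prod.fst = vd.map Prod.fst := by
      show (lab.items.map (fun p => (p.1, if p.2 = b then a else p.2))).map Prod.fst = vd.map Prod.fst
      rw [List.map_map]
      refine Eq.trans ?_ hkeys
      apply List.map_congr_left
      intro p _
      rfl
  -- new label of z: old label with b renamed to a
    have hnew : ∀ z wz, lab.get? z = some wz →
        (PySem.Dict.mk (lab.items.map (fun p => (p.1, if p.2 = b then a else p.2)))).get? z =
          some (if wz = b then a else wz) := by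
      intro z wz hz
      have := pv_get?_mk_mapVal lab.items (fun w => if w = b then a else w) z
      rw [this, show PySem.Dict.mk lab.items = lab from rfl, hz]
      rfl
    refine ⟨hkeys', fun u v hu hv => ?_⟩
    obtain ⟨wu, hgu⟩ := pv_get?_isSome_of_mem_keys lab u (by rw [hkeys]; exact hu)
    obtain ⟨wv, hgv⟩ := pv_get?_isSome_of_mem_keys lab v (by rw [hkeys]; exact hv)
    rw [hnew u wu hgu, hnew v wv hgv, hsnoc u v]
    have hu_v : (wu = wv) ↔ pvECl pre u v := by
      rw [← hiff u v hu hv, hgu, hgv]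
      simp
    have hu_x : (wu = a) ↔ pvECl pre u x := by
      rw [← hiff u x hu hx, hgu, hga]
      simp
    have hu_y : (wu = b) ↔ pvECl pre u y := by
      rw [← hiff u y hu hy, hgu, hgb]
      simp
    have hv_x : (wv = a) ↔ pvECl pre v x := by
      rw [← hiff v x hv hx, hgv, hga]
      simp
    have hv_y : (wv = b) ↔ pvECl pre v y := by
      rw [← hiff v y hv hy, hgv, hgb]
      simp
    constructor
    · intro h
      rw [Option.some_inj] at h
      by_cases h1 : wu = b <;> by_cases h2 : wv = b
      · exact Or.inl (Relation.EqvGen.trans _ _ _ (hu_y.mp h1)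
          (Relation.EqvGen.symm _ _ (hv_y.mp h2)))
      · rw [if_pos h1, if_neg h2] at h
        exact Or.inr (Or.inr ⟨hu_y.mp h1, Relation.EqvGen.symm _ _ (hv_x.mp h.symm)⟩)
      · rw [if_neg h1, if_pos h2] at h
        exact Or.inr (Or.inl ⟨hu_x.mp h, Relation.EqvGen.symm _ _ (hv_y.mp h2)⟩)
      · rw [if_neg h1, if_neg h2] at h
        exact Or.inl (hu_v.mp h)
    · rintro (h | ⟨h1, h2⟩ | ⟨h1, h2⟩)
      · rw [hu_v.mpr h]
      · have e1 : wu = a := hu_x.mpr h1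
        have e2 : wv = b := hv_y.mpr (Relation.EqvGen.symm _ _ h2)
        rw [e1, e2, if_pos rfl, if_neg hab]
      · have e1 : wu = b := hu_y.mpr h1
        have e2 : wv = a := hv_x.mpr (Relation.EqvGen.symm _ _ h2)
        rw [e1, e2, if_pos rfl, if_neg hab]

theorem pv_invB_foldl (vd : List (Int × Int)) (Q pre : List (Int × Int)) (lab : PySem.Dict Int Int)
    (hQ : ∀ p ∈ Q, p.1 ∈ vd.map Prod.fst ∧ p.2 ∈ vd.map Prod.fst) (hinv : pvInvB pre vd lab) :
    pvInvB (pre ++ Q) vd (Q.foldl (fun lab p => pvUnionStep lab p.1 p.2) lab) := by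
  induction Q generalizing pre lab with
  | nil => simpa using hinv
  | cons p rest ih =>
    rw [List.foldl_cons]
    have hstep := pv_invB_step pre vd lab p.1 p.2 (hQ p List.mem_cons_self).1
      (hQ p List.mem_cons_self).2 hinv
    have hrest := ih (pre ++ [(p.1, p.2)]) _
      (fun q hq => hQ q (List.mem_cons_of_mem p hq)) hstep
    simpa [List.append_assoc] using hrest

-- ---- B's reported value is the component minimum ----
-- the best-dict fold computes, at each label r, the running minimum of the values carrying r
theorem pv_best_get (lab : PySem.Dict Int Int) (l : List (Int × Int)) (best : PySem.Dict Int Int) (r : Int) :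
    (l.foldl (fun b q => pvBestStep lab b q) best).get? r =
      ((l.filter (fun q => lab.get? q.1 == some r)).map Prod.snd).foldl
        (fun o w => match o with | none => some w | some m => some (min m w)) (best.get? r) := by
  induction l generalizing best with
  | nil => rfl
  | cons q t ih =>
    rw [List.foldl_cons]
    cases hq : lab.get? q.1 with
    | none =>
      have hstep : pvBestStep lab best q = best := by
        unfold pvBestStep
        rw [hq]
      have hfilt : (lab.get? q.1 == some r) = false := by
        rw [hq]
        rfl
      rw [List.filter_cons_of_neg (by simp [hfilt])]
      rw [hstep]
      exact ih best
    | some rq =>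
      by_cases hrq : rq = r
      · subst hrq
        have hfilt : (lab.get? q.1 == some rq) = true := by
          rw [hq]
          exact beq_self_eq_true _
        rw [List.filter_cons_of_pos (by rw [hfilt]), List.map_cons, List.foldl_cons]
        have hstep : (pvBestStep lab best q).get? rq =
            (match best.get? rq with | none => some q.2 | some m => some (min m q.2)) := by
          unfold pvBestStep
          simp only [hq]
          cases hb : best.get? rq with
          | none =>
            exact PySem.Dict.get?_insert_self best rq q.2
          | some m =>
            dsimp only
            by_cases hlt : q.2 < m
            · rw [if_pos hlt, PySem.Dict.get?_insert_self best rq q.2]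
              congr 1
              omega
            · rw [if_neg hlt, hb]
              congr 1
              omega
        rw [ih (pvBestStep lab best q), hstep]
      · have hfilt : (lab.get? q.1 == some r) = false := by
          rw [hq]
          simp [hrq]
        rw [List.filter_cons_of_neg (by simp [hfilt])]
        have hstep : (pvBestStep lab best q).get? r = best.get? r := by
          unfold pvBestStep
          simp only [hq]
          cases hb : best.get? rq with
          | none =>
            exact PySem.Dict.get?_insert_of_ne best q.2 (fun h => hrq h.symm)
          | some m =>
            dsimp only
            by_cases hlt : q.2 < m
            · rw [if_pos hlt]
              exact PySem.Dict.get?_insert_of_ne best q.2 (fun h => hrq h.symm)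
            · rw [if_neg hlt]
        rw [ih (pvBestStep lab best q), hstep]

-- a nonempty running minimum is the least member of the list
theorem pv_foldmin_some (t : List Int) (x : Int) :
    t.foldl (fun o w => match o with | none => some w | some m => some (min m w)) (some x) =
      some (t.foldl min x) := by
  induction t generalizing x with
  | nil => rfl
  | cons w t' ih => exact ih (min x w)

theorem pv_foldmin_none (ws : List Int) (hne : ws ≠ []) :
    ∃ m, ws.foldl (fun o w => match o with | none => some w | some m => some (min m w)) (none : Option Int) = some m ∧
      m ∈ ws ∧ ∀ w ∈ ws, m ≤ w := by
  cases ws with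
  | nil => exact absurd rfl hne
  | cons x t =>
    refine ⟨t.foldl min x, ?_, ?_, ?_⟩
    · rw [List.foldl_cons]
      exact pv_foldmin_some t x
    · have := PySem.List.min?_mem (xs := x :: t) (key := fun y => y) (m := t.foldl min x)
        (by rw [PySem.List.min?_id_cons])
      exact this
    · intro w hw
      have := PySem.List.min?_isMin (xs := x :: t) (key := fun y => y) (m := t.foldl min x)
        (by rw [PySem.List.min?_id_cons]) w hw
      exact this

theorem pv_B_final (P vd : List (Int × Int)) (lab : PySem.Dict Int Int) (k r : Int)
    (hk : k ∈ vd.map Prod.fst) (hinv : pvInvB P vd lab) (hr : lab.get? k = some r) :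
    ∃ m, (vd.foldl (fun b q => pvBestStep lab b q) PySem.Dict.empty).get? r = some m ∧
      pvIsCMin P vd k m := by
  obtain ⟨hkeys, hiff⟩ := hinv
  have htest : ∀ q ∈ vd, ((lab.get? q.1 == some r) = true) ↔ pvECl P q.1 k := by
    intro q hq
    have hq1 : q.1 ∈ vd.map Prod.fst := List.mem_map_of_mem hq
    rw [beq_iff_eq, ← hr]
    exact hiff q.1 k hq1 hk
  obtain ⟨qk, hqk, hqkk⟩ := List.mem_map.mp hk
  have hqkf : qk ∈ vd.filter (fun q => lab.get? q.1 == some r) := by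
    rw [List.mem_filter, hqkk, hr]
    exact ⟨hqk, beq_self_eq_true _⟩
  have hLne : (vd.filter (fun q => lab.get? q.1 == some r)).map Prod.snd ≠ [] := by
    intro hcon
    have := List.mem_map_of_mem (f := Prod.snd) hqkf
    rw [hcon] at this
    exact absurd this (List.not_mem_nil)
  obtain ⟨m, hm, hmem, hmin⟩ := pv_foldmin_none _ hLne
  refine ⟨m, ?_, ?_, ?_⟩
  · rw [pv_best_get lab vd PySem.Dict.empty r, PySem.Dict.get?_empty]
    exact hm
  · obtain ⟨q, hqf, hqm⟩ := List.mem_map.mp hmem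
    rw [List.mem_filter] at hqf
    exact ⟨q, hqf.1, (htest q hqf.1).mp hqf.2, hqm⟩
  · intro q hq hcl
    exact hmin q.2 (List.mem_map_of_mem (List.mem_filter.mpr ⟨hq, (htest q hq).mpr hcl⟩))

-- ---- assembly ----
theorem trouve_liaisons_spec_aux (nodes : List Int) (arretes : List (Int × Int)) (valeur_noeuds : List (Int × Int)) (nb_lignes nb_colonnes : Int)
    (hpre : Pre_trouve_liaisons nodes arretes valeur_noeuds nb_lignes nb_colonnes) :
    trouve_liaisons nodes arretes valeur_noeuds nb_lignes nb_colonnes =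
      trouve_liaisons_alt nodes arretes valeur_noeuds nb_lignes nb_colonnes := by
  have hK : (valeur_noeuds.map Prod.fst).Nodup := hpre.1
  -- reduce B's label fold to the fold over the shared pair sequence
  have hlab := pv_labelFold_eq_foldl nodes arretes nb_lignes nb_colonnes
    (PySem.Dict.mk (valeur_noeuds.map (fun p => (p.1, p.1))))
  show (pvLoopA nodes arretes nb_lignes nb_colonnes (valeur_noeuds.length * valeur_noeuds.length + 1) (PySem.Dict.mk valeur_noeuds)).items =
    valeur_noeuds.map (fun p => (p.1,
      match (nodes.foldl (fun lab node =>
        (trouve_voisin node nb_lignes nb_colonnes).foldl (fun lab voisin =>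
          if (PySem.Set.ofList arretes).contains (voisin, node) || (PySem.Set.ofList arretes).contains (node, voisin)
          then pvUnionStep lab node voisin else lab) lab)
        (PySem.Dict.mk (valeur_noeuds.map (fun p => (p.1, p.1))))).get? p.1 with
      | some r => (valeur_noeuds.foldl (fun best q => pvBestStep (nodes.foldl (fun lab node =>
          (trouve_voisin node nb_lignes nb_colonnes).foldl (fun lab voisin =>
            if (PySem.Set.ofList arretes).contains (voisin, node) || (PySem.Set.ofList arretes).contains (node, voisin)
            then pvUnionStep lab node voisin else lab) lab)
          (PySem.Dict.mk (valeur_noeuds.map (fun p => (p.1, p.1))))) best q) PySem.Dict.empty).getD r 0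
      | none => 0))
  rw [hlab]
  have hinvB : pvInvB (pvPairs nodes arretes nb_lignes nb_colonnes) valeur_noeuds
      ((pvPairs nodes arretes nb_lignes nb_colonnes).foldl (fun lab p => pvUnionStep lab p.1 p.2)
        (PySem.Dict.mk (valeur_noeuds.map (fun p => (p.1, p.1))))) := by
    have := pv_invB_foldl valeur_noeuds (pvPairs nodes arretes nb_lignes nb_colonnes) []
      (PySem.Dict.mk (valeur_noeuds.map (fun p => (p.1, p.1))))
      (pv_mem_pairs_endpoints nodes arretes valeur_noeuds nb_lignes nb_colonnes hpre)
      (pv_invB_init valeur_noeuds)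
    simpa using this
  have hinvA : pvInvA (pvPairs nodes arretes nb_lignes nb_colonnes) valeur_noeuds
      (pvLoopA nodes arretes nb_lignes nb_colonnes (valeur_noeuds.length * valeur_noeuds.length + 1) (PySem.Dict.mk valeur_noeuds)) :=
    pv_invA_loopA nodes arretes valeur_noeuds nb_lignes nb_colonnes _ _ hK
      (pv_invA_init _ valeur_noeuds)
  have hdfk := hinvA.1
  have hdfknd : ((pvLoopA nodes arretes nb_lignes nb_colonnes (valeur_noeuds.length * valeur_noeuds.length + 1) (PySem.Dict.mk valeur_noeuds)).items.map Prod.fst).Nodup := by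
    rw [hdfk]
    exact hK
  have hlen : (pvLoopA nodes arretes nb_lignes nb_colonnes (valeur_noeuds.length * valeur_noeuds.length + 1) (PySem.Dict.mk valeur_noeuds)).items.length = valeur_noeuds.length := by
    have := congrArg List.length hdfk
    simpa using this
  apply List.ext_getElem (by simpa using hlen)
  intro i h1 h2
  have h2' : i < valeur_noeuds.length := by simpa using h2
  rw [List.getElem_map]
  have hfst : ((pvLoopA nodes arretes nb_lignes nb_colonnes (valeur_noeuds.length * valeur_noeuds.length + 1) (PySem.Dict.mk valeur_noeuds)).items[i]'h1).1 = (valeur_noeuds[i]'h2').1 := by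
    have := congrArg (fun t => t.getD i 0) hdfk
    simpa [List.getD_eq_getElem, h1, h2'] using this
  have hkmem : (valeur_noeuds[i]'h2').1 ∈ valeur_noeuds.map Prod.fst :=
    List.mem_map_of_mem (List.getElem_mem h2')
  have hgq : (pvLoopA nodes arretes nb_lignes nb_colonnes (valeur_noeuds.length * valeur_noeuds.length + 1) (PySem.Dict.mk valeur_noeuds)).get? ((valeur_noeuds[i]'h2').1) =
      some (((pvLoopA nodes arretes nb_lignes nb_colonnes (valeur_noeuds.length * valeur_noeuds.length + 1) (PySem.Dict.mk valeur_noeuds)).items[i]'h1).2) := by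
    rw [← hfst]
    exact PySem.Dict.get?_of_mem_items _ (List.getElem_mem h1) hdfknd
  have hA := pv_A_final nodes arretes valeur_noeuds nb_lignes nb_colonnes hpre
    ((valeur_noeuds[i]'h2').1) _ hkmem hgq
  obtain ⟨r, hr⟩ := pv_get?_isSome_of_mem_keys
    ((pvPairs nodes arretes nb_lignes nb_colonnes).foldl (fun lab p => pvUnionStep lab p.1 p.2)
      (PySem.Dict.mk (valeur_noeuds.map (fun p => (p.1, p.1)))))
    ((valeur_noeuds[i]'h2').1) (by rw [hinvB.1]; exact hkmem)
  obtain ⟨m, hbm, hcm⟩ := pv_B_final (pvPairs nodes arretes nb_lignes nb_colonnes) valeur_noeuds _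
    ((valeur_noeuds[i]'h2').1) r hkmem hinvB hr
  have hsnd := pv_cmin_unique (pvPairs nodes arretes nb_lignes nb_colonnes) valeur_noeuds
    ((valeur_noeuds[i]'h2').1) _ _ hA hcm
  refine Prod.ext hfst ?_
  rw [hr]
  show ((pvLoopA nodes arretes nb_lignes nb_colonnes (valeur_noeuds.length * valeur_noeuds.length + 1) (PySem.Dict.mk valeur_noeuds)).items[i]'h1).2 =
    (valeur_noeuds.foldl (fun best q => pvBestStep
      ((pvPairs nodes arretes nb_lignes nb_colonnes).foldl (fun lab p => pvUnionStep lab p.1 p.2)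
        (PySem.Dict.mk (valeur_noeuds.map (fun p => (p.1, p.1))))) best q) PySem.Dict.empty).getD r 0
  rw [PySem.Dict.getD_eq_get?_getD, hbm]
  exact hsnd

-- ===== VERDICT (by name: the statement is the Claim_ definition above) =====
theorem trouve_liaisons_spec : Claim_equal_trouve_liaisons := by
  intro nodes arretes valeur_noeuds nb_lignes nb_colonnes _ hpre
  exact trouve_liaisons_spec_aux nodes arretes valeur_noeuds nb_lignes nb_colonnes hpre
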